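-- pv_equiv track=rewrite | github.com/asntcrz/BasicCompiler | optimizador.py | crea_linea
-- ===== SOURCE A (Python) =====
-- def crea_linea(n,k):
--     aux = ""
--     for i in range(n):
--         if k == "push":
--             aux = aux + "\t\tPUSH #0\n"
--         elif k == "pop":
--             aux = aux + "\t\tPOP .R8\n"
--     return aux
-- ===== SOURCE B (Python) =====
-- def crea_linea(n, k):
--     if k == "push":
--         return "\t\tPUSH #0\n" * n
--     elif k == "pop":
--         return "\t\tPOP .R8\n" * n
--     else:
--         return ""
-- ===== Notes on version B (the rewrite author's own statement) =====
-- stated objective: simpler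
-- what changed: Replaces the n-iteration loop (with its loop-invariant branch on k inside) by one test of k followed by a closed-form string multiplication (str * n), which also yields "" for n <= 0.
import Mathlib
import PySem

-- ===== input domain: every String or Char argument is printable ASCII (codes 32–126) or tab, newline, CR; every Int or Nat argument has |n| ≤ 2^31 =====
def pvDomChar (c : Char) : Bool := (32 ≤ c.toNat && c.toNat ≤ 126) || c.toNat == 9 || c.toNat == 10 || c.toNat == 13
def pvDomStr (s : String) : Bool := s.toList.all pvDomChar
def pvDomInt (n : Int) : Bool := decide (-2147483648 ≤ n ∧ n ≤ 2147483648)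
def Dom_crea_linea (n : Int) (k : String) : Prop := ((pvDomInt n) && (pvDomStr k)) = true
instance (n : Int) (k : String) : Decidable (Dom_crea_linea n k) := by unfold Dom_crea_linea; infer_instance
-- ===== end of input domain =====

-- B replaces A's n-iteration concatenation loop (branch on k inside) by one test of k and a
-- closed-form string repetition; same return value on every input, objective: simpler.

-- ===== PORT A =====
-- aux = ""; for i in range(n): if k == "push": aux += "\t\tPUSH #0\n" elif k == "pop": aux += "\t\tPOP .R8\n"; return aux
def crea_linea (n : Int) (k : String) : String :=
  String.ofList ((PySem.List.pyRange 0 n 1).foldl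
    (fun aux _ =>
      if k = "push" then aux ++ "\t\tPUSH #0\n".toList
      else if k = "pop" then aux ++ "\t\tPOP .R8\n".toList
      else aux) [])

-- ===== PORT B =====
-- if k=="push": return "\t\tPUSH #0\n" * n; elif k=="pop": return "\t\tPOP .R8\n" * n; else: return ""
def crea_linea_alt (n : Int) (k : String) : String :=
  if k = "push" then String.ofList (PySem.List.pyRepeat "\t\tPUSH #0\n".toList n)
  else if k = "pop" then String.ofList (PySem.List.pyRepeat "\t\tPOP .R8\n".toList n)
  else ""

-- ===== PRECONDITION & SPEC =====
def Spec_crea_linea (n : Int) (k : String) (out : String) : Prop := out = crea_linea_alt n k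
instance (n : Int) (k : String) (out : String) : Decidable (Spec_crea_linea n k out) := by unfold Spec_crea_linea; infer_instance

-- ===== CLAIM (what is proved, stated in full; the proofs are below) =====
def Claim_equal_crea_linea : Prop := ∀ (n : Int) (k : String), Dom_crea_linea n k → Spec_crea_linea n k (crea_linea n k)

-- ===== LEMMAS AND PROOFS =====

-- A fold that appends the constant chunk s once per element produces acc ++ (length copies of s).
theorem foldl_append_const {α : Type} (s : List α) :
    ∀ (l : List Int) (acc : List α),
      l.foldl (fun a (_ : Int) => a ++ s) acc = acc ++ (List.replicate l.length s).flatten := by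
  intro l
  induction l with
  | nil => intro acc; simp
  | cons x t ih => intro acc; simp [List.foldl, ih, List.replicate_succ]

-- ===== VERDICT (by name: the statement is the Claim_ definition above) =====
theorem crea_linea_spec : Claim_equal_crea_linea := by
  intro n k _
  unfold Spec_crea_linea crea_linea crea_linea_alt PySem.List.pyRepeat
  by_cases hp : k = "push"
  · simp only [hp, if_pos trivial]
    rw [foldl_append_const]
    simp [PySem.List.length_pyRange_one]
  · by_cases hq : k = "pop"
    · have h : ¬ ("pop" : String) = "push" := by decide
      simp only [hq, if_neg h, if_pos trivial]
      rw [foldl_append_const]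
      simp [PySem.List.length_pyRange_one]
    · simp only [if_neg hp, if_neg hq]
      simp [List.foldl_fixed]
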